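-- pv_equiv track=rewrite | github.com/amitk1990/Advent-of-Code | advent-of-code/2021/day15/chiton.py | build_5x5matrix
-- ===== SOURCE A (Python) =====
-- import math
-- import copy
--
-- def build_5x5matrix(input):
--   row, column = len(input), len(input[0])
--   new_column = column*5
--   first = []
--   index = i = 0
--
--   while i < row:
--     temp = []
--     j = 0
--     while j < new_column:
--       value = math.floor(j/column)
--       score = input[i][j%column] + 1*value
--       if score >= 10:
--         score = score%10 + 1
--
--       temp.append(score)
--       j += 1
--     i += 1
--     first.append(temp)
--   # 1 * 5 dimension matrix
--   new_matrix = copy.deepcopy(first)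
--
--   # setup remaining part of the matrix
--   index = 1
--   while index <= 4:
--     second = []
--     for item in first:
--       temp = []
--       for score in item:
--         new_score = score + 1
--         if new_score >= 10:
--           new_score = new_score%10 + 1
--         temp.append(new_score)
--       second.append(temp)
--       new_matrix.append(temp)
--
--     first = second
--     index += 1
--   return new_matrix
-- ===== SOURCE B (Python) =====
-- def build_5x5matrix(input):
--   row, column = len(input), len(input[0])
--
--   def cell(i, j, h, v):
--     base = input[i][j] + h
--     if base >= 10:
--       base = base % 10 + 1
--     for _ in range(v):
--       base += 1
--       if base >= 10:
--         base = base % 10 + 1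
--     return base
--
--   return [[cell(I % row, J % column, J // column, I // row)
--            for J in range(5 * column)]
--           for I in range(5 * row)]
-- ===== Notes on version B (the rewrite author's own statement) =====
-- stated objective: simpler
-- what changed: Replaces A's two-phase construction (build the top 1x5 strip with deepcopy, then derive each lower strip from the previous one while appending) by a single coordinate-driven nested comprehension that computes every output cell directly from (I%row, J%column, J//column, I//row), reproducing A's exact single-step wrap.
import Mathlib
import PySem

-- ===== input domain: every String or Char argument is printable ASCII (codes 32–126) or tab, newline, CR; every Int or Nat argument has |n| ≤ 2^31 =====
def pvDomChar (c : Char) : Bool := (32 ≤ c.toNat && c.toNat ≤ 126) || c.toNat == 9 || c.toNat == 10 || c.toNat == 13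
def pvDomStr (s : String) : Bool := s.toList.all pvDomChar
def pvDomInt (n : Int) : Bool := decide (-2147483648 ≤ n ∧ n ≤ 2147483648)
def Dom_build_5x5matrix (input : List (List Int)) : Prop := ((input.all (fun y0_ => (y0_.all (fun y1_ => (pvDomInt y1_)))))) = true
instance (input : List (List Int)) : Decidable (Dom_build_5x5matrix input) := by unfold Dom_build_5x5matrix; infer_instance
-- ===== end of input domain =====

-- B replaces A's strip-then-shift two-phase construction by one coordinate-driven
-- nested comprehension (same cost, simpler decomposition); return values proved equal.


-- ===== PORT A =====
def build_5x5matrix (input : List (List Int)) : List (List Int) :=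
  let row : Int := PySem.List.len input
  let column : Int := PySem.List.len (input.headD [])   -- input[0]; Pre_ guarantees input ≠ []
  let new_column : Int := column * 5
  let first : List (List Int) :=
    (PySem.List.pyRange 0 row 1).foldl (fun first i =>
      let temp : List Int :=
        (PySem.List.pyRange 0 new_column 1).foldl (fun temp j =>
          let value := PySem.Int.floordiv j column
          let score := PySem.List.pyGetD (PySem.List.pyGetD input i []) (PySem.Int.mod j column) 0 + 1 * value
          let score := if score ≥ 10 then PySem.Int.mod score 10 + 1 else score
          temp ++ [score]) []
      first ++ [temp]) []
  -- new_matrix = deepcopy(first); then index = 1..4 builds each next strip from the previous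
  let res :=
    (PySem.List.pyRange 1 5 1).foldl (fun (st : List (List Int) × List (List Int)) _ =>
      st.2.foldl (fun (q : List (List Int) × List (List Int)) item =>
        let temp : List Int :=
          item.foldl (fun temp score =>
            let new_score := score + 1
            let new_score := if new_score ≥ 10 then PySem.Int.mod new_score 10 + 1 else new_score
            temp ++ [new_score]) []
        (q.1 ++ [temp], q.2 ++ [temp])) (st.1, [])) (first, first)
  res.1

-- ===== PORT B =====
def build_5x5matrix_alt (input : List (List Int)) : List (List Int) :=
  let row : Int := PySem.List.len input
  let column : Int := PySem.List.len (input.headD [])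
  (PySem.List.pyRange 0 (5 * row) 1).map (fun I =>
    (PySem.List.pyRange 0 (5 * column) 1).map (fun J =>
      let base := PySem.List.pyGetD (PySem.List.pyGetD input (PySem.Int.mod I row) []) (PySem.Int.mod J column) 0
                    + PySem.Int.floordiv J column
      let base := if base ≥ 10 then PySem.Int.mod base 10 + 1 else base
      (PySem.List.pyRange 0 (PySem.Int.floordiv I row) 1).foldl (fun b _ =>
        let b := b + 1
        if b ≥ 10 then PySem.Int.mod b 10 + 1 else b) base))

-- ===== PRECONDITION & SPEC =====
-- Pre_ excludes exactly the inputs where the Python A raises: the empty list (input[0] is an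
-- IndexError) and ragged inputs with a row shorter than the first row (input[i][j%column] raises).
def Pre_build_5x5matrix (input : List (List Int)) : Prop :=
  input ≠ [] ∧ ∀ r ∈ input, (input.headD []).length ≤ r.length
instance (input : List (List Int)) : Decidable (Pre_build_5x5matrix input) := by
  unfold Pre_build_5x5matrix; infer_instance
def pvWitness_build_5x5matrix : List (List Int) := [[1, 8], [9, 2]]

def Spec_build_5x5matrix (input : List (List Int)) (out : List (List Int)) : Prop := out = build_5x5matrix_alt input
instance (input : List (List Int)) (out : List (List Int)) : Decidable (Spec_build_5x5matrix input out) := by unfold Spec_build_5x5matrix; infer_instance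

-- ===== CLAIM (what is proved, stated in full; the proofs are below) =====
def Claim_equal_build_5x5matrix : Prop := ∀ (input : List (List Int)), Dom_build_5x5matrix input → Pre_build_5x5matrix input → Spec_build_5x5matrix input (build_5x5matrix input)

-- ===== LEMMAS AND PROOFS =====

def pvB (x : Int) : Int := if x + 1 ≥ 10 then PySem.Int.mod (x + 1) 10 + 1 else x + 1
def pvCell (input : List (List Int)) (i j : Int) : Int :=
  let m : Int := ((input.headD []).length : Int)
  let e := PySem.List.pyGetD (PySem.List.pyGetD input i []) (PySem.Int.mod j m) 0 + PySem.Int.floordiv j m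
  if e ≥ 10 then PySem.Int.mod e 10 + 1 else e
def pvBlock (input : List (List Int)) (f : Int → Int) : List (List Int) :=
  (PySem.List.pyRange 0 ((input.length : Int)) 1).map (fun i =>
    (PySem.List.pyRange 0 (((input.headD []).length : Int) * 5) 1).map (fun j => f (pvCell input i j)))
def pvNF (input : List (List Int)) : List (List Int) :=
  pvBlock input (fun x => x) ++ pvBlock input (fun x => pvB x) ++ pvBlock input (fun x => pvB (pvB x))
    ++ pvBlock input (fun x => pvB (pvB (pvB x))) ++ pvBlock input (fun x => pvB (pvB (pvB (pvB x))))

theorem pvPairFold (g : List Int → List Int) (l a b : List (List Int)) :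
    l.foldl (fun q item => (q.1 ++ [g item], q.2 ++ [g item])) (a, b) = (a ++ l.map g, b ++ l.map g) := by
  induction l generalizing a b with
  | nil => simp
  | cons x t ih => simp [List.foldl_cons, ih]

theorem pvA_norm (input : List (List Int)) : build_5x5matrix input = pvNF input := by
  have h45 : PySem.List.pyRange 1 5 1 = [1,2,3,4] := by decide
  simp only [build_5x5matrix, h45, PySem.List.len_eq, List.foldl_cons, List.foldl_nil,
    PySem.List.foldl_append_singleton_eq_map, List.nil_append, one_mul, pvPairFold]
  simp [pvNF, pvBlock, pvCell, pvB, List.map_map, Function.comp_def]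

theorem pv_mod_shift (n k t : Int) (hn : 0 < n) (h0 : 0 ≤ t) (h1 : t < n) :
    PySem.Int.mod (k * n + t) n = t := by
  rw [PySem.Int.mod_eq_emod_of_pos hn, show k * n + t = t + n * k from by ring,
    Int.add_mul_emod_self_left]
  exact Int.emod_eq_of_lt h0 h1

theorem pv_div_shift (n k t : Int) (hn : 0 < n) (h0 : 0 ≤ t) (h1 : t < n) :
    PySem.Int.floordiv (k * n + t) n = k := by
  rw [PySem.Int.floordiv_eq_iff_of_pos hn]
  constructor <;> nlinarith

theorem pvRange_shift (a b : Int) :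
    PySem.List.pyRange a (a + b) 1 = (PySem.List.pyRange 0 b 1).map (fun t => a + t) := by
  simp [PySem.List.pyRange_one, List.map_map, Function.comp_def]

theorem pvB_norm (input : List (List Int)) (hne : input ≠ []) :
    build_5x5matrix_alt input = pvNF input := by
  have hnn : 0 < input.length := List.length_pos_iff.mpr hne
  have hn : 0 < (input.length : Int) := by exact_mod_cast hnn
  set n : Int := (input.length : Int) with hndef
  have e1 : PySem.List.pyRange n (2*n) 1 = (PySem.List.pyRange 0 n 1).map (fun t => n + t) := by
    rw [show (2:Int)*n = n + n from by ring]; exact pvRange_shift n n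
  have e2 : PySem.List.pyRange (2*n) (3*n) 1 = (PySem.List.pyRange 0 n 1).map (fun t => 2*n + t) := by
    rw [show (3:Int)*n = 2*n + n from by ring]; exact pvRange_shift (2*n) n
  have e3 : PySem.List.pyRange (3*n) (4*n) 1 = (PySem.List.pyRange 0 n 1).map (fun t => 3*n + t) := by
    rw [show (4:Int)*n = 3*n + n from by ring]; exact pvRange_shift (3*n) n
  have e4 : PySem.List.pyRange (4*n) (5*n) 1 = (PySem.List.pyRange 0 n 1).map (fun t => 4*n + t) := by
    rw [show (5:Int)*n = 4*n + n from by ring]; exact pvRange_shift (4*n) n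
  have hs : PySem.List.pyRange 0 (5*n) 1
      = PySem.List.pyRange 0 n 1 ++ ((PySem.List.pyRange 0 n 1).map (fun t => n + t)
        ++ ((PySem.List.pyRange 0 n 1).map (fun t => 2*n + t)
        ++ ((PySem.List.pyRange 0 n 1).map (fun t => 3*n + t)
        ++ (PySem.List.pyRange 0 n 1).map (fun t => 4*n + t)))) := by
    rw [PySem.List.pyRange_one_append 0 n (5*n) (by omega) (by omega),
      PySem.List.pyRange_one_append n (2*n) (5*n) (by omega) (by omega),
      PySem.List.pyRange_one_append (2*n) (3*n) (5*n) (by omega) (by omega),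
      PySem.List.pyRange_one_append (3*n) (4*n) (5*n) (by omega) (by omega),
      e1, e2, e3, e4]
  simp only [build_5x5matrix_alt, PySem.List.len_eq, ← hndef, hs, List.map_append, List.map_map]
  simp only [pvNF, pvBlock, pvCell, pvB, List.append_assoc]
  congr 1
  · apply List.map_congr_left
    intro t ht
    rw [PySem.List.mem_pyRange_one] at ht
    rw [show PySem.Int.mod t n = t from by simpa using pv_mod_shift n 0 t hn ht.1 ht.2,
      show PySem.Int.floordiv t n = 0 from by simpa using pv_div_shift n 0 t hn ht.1 ht.2,
      show PySem.List.pyRange 0 0 1 = [] from by decide]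
    simp [mul_comm]
  congr 1
  · apply List.map_congr_left
    intro t ht
    rw [PySem.List.mem_pyRange_one] at ht
    simp only [Function.comp_apply]
    rw [show PySem.Int.mod (n + t) n = t from by simpa using pv_mod_shift n 1 t hn ht.1 ht.2,
      show PySem.Int.floordiv (n + t) n = 1 from by simpa using pv_div_shift n 1 t hn ht.1 ht.2,
      show PySem.List.pyRange 0 1 1 = [0] from by decide]
    simp [mul_comm]
  congr 1
  · apply List.map_congr_left
    intro t ht
    rw [PySem.List.mem_pyRange_one] at ht
    simp only [Function.comp_apply]
    rw [show PySem.Int.mod (2*n + t) n = t from by simpa using pv_mod_shift n 2 t hn ht.1 ht.2,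
      show PySem.Int.floordiv (2*n + t) n = 2 from by simpa using pv_div_shift n 2 t hn ht.1 ht.2,
      show PySem.List.pyRange 0 2 1 = [0, 1] from by decide]
    simp [mul_comm]
  congr 1
  · apply List.map_congr_left
    intro t ht
    rw [PySem.List.mem_pyRange_one] at ht
    simp only [Function.comp_apply]
    rw [show PySem.Int.mod (3*n + t) n = t from by simpa using pv_mod_shift n 3 t hn ht.1 ht.2,
      show PySem.Int.floordiv (3*n + t) n = 3 from by simpa using pv_div_shift n 3 t hn ht.1 ht.2,
      show PySem.List.pyRange 0 3 1 = [0, 1, 2] from by decide]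
    simp [mul_comm]
  · apply List.map_congr_left
    intro t ht
    rw [PySem.List.mem_pyRange_one] at ht
    simp only [Function.comp_apply]
    rw [show PySem.Int.mod (4*n + t) n = t from by simpa using pv_mod_shift n 4 t hn ht.1 ht.2,
      show PySem.Int.floordiv (4*n + t) n = 4 from by simpa using pv_div_shift n 4 t hn ht.1 ht.2,
      show PySem.List.pyRange 0 4 1 = [0, 1, 2, 3] from by decide]
    simp [mul_comm]

-- ===== VERDICT (by name: the statement is the Claim_ definition above) =====
theorem build_5x5matrix_spec : Claim_equal_build_5x5matrix := by
  intro input _ hpre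
  unfold Spec_build_5x5matrix
  rw [pvA_norm, pvB_norm input hpre.1]
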